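-- pv_equiv track=rewrite | github.com/Boerseth/aoc | python/2023/13.py | solve
-- ===== SOURCE A (Python) =====
-- from collections.abc import Iterator
-- from collections import defaultdict, Counter
--
-- def solve(text: str) -> Iterator[int]:
--     patterns = [pattern.splitlines() for pattern in text.split("\n\n")]
--     summary = defaultdict(int)
--     for pattern in patterns:
--         for multiplier, pat in [(100, pattern), (1, list(zip(*pattern)))]:
--             for index in range(1, len(pat)):
--                 p1 = pat[index:]
--                 p2 = pat[:index][::-1]
--                 diff = sum(c1 != c2 for l1, l2 in zip(p1, p2) for c1, c2 in zip(l1, l2))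
--                 summary[diff] += multiplier * index
--     yield summary[0]
--     yield summary[1]
-- ===== SOURCE B (Python) =====
-- def solve(text: str):
--     # Interning + incremental two-stack sweep: rows are interned to ids (first
--     # occurrence index), so most reflected pairs are compared as one int
--     # equality; characters are counted only for pairs with distinct ids, and
--     # the scan stops once the split can be neither perfect nor one-smudge.
--     t0 = t1 = 0
--     for chunk in text.split("\n\n"):
--         rows = chunk.splitlines()
--         for mult, pat in ((100, rows), (1, list(zip(*rows)))):
--             first = {}
--             tagged = [(first.setdefault(r, i), r) for i, r in enumerate(pat)]
--             above = []            # rows above the mirror line, nearest first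
--             below = tagged
--             i = 0
--             while below:
--                 above = [below[0]] + above
--                 below = below[1:]
--                 i += 1
--                 if not below:
--                     break
--                 total = 0
--                 for (ja, ra), (jb, rb) in zip(above, below):
--                     if ja != jb:  # distinct ids <=> distinct rows
--                         for a, b in zip(ra, rb):
--                             total += a != b
--                         if total > 1:
--                             break
--                 if total == 0:
--                     t0 += mult * i
--                 elif total == 1:
--                     t1 += mult * i
--     yield t0
--     yield t1
-- ===== Notes on version B (the rewrite author's own statement) =====
-- stated objective: faster
-- what changed: A slices the pattern at every candidate mirror line and sums the full character-mismatch count of the two halves, tallying every count in a defaultdict read at keys 0 and 1; B interns rows to ids (first-occurrence index) so reflected pairs are compared by one int equality, sweeps the pattern once with an incremental above/below two-stack state, counts characters only for pairs with distinct ids stopping as soon as the count exceeds 1, and keeps just two integer accumulators.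
import Mathlib
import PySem

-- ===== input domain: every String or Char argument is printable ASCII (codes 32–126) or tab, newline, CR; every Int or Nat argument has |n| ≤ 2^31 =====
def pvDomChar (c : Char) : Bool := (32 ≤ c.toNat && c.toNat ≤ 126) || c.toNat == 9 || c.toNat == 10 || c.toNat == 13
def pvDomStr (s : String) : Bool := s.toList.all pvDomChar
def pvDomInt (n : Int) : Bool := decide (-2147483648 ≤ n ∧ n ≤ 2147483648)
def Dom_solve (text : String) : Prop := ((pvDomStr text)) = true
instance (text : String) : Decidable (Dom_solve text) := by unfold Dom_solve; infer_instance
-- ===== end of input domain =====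

-- B replaces A's slice-and-recount per mirror line by interning rows to ids
-- (first-occurrence index) and an incremental two-stack sweep: most reflected
-- pairs are rejected by one id comparison, characters are counted only for
-- pairs with distinct ids, stopping once the split can be neither perfect nor
-- one-smudge; two plain accumulators replace A's defaultdict (objective: faster).

-- shared preprocessing helpers (both Pythons run the identical lines
-- 'text.split("\n\n")', '.splitlines()' and 'zip(*pattern)'):

-- zip(*rows): hand port of Python's zip over the unpacked rows (PySem has no
-- n-ary zip). Exact: empty argument list gives [], otherwise truncates at the
-- shortest row; fuel = length of the first row bounds the number of steps.
def pyZipStarGo : Nat → List (List Char) → List (List Char)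
  | 0, _ => []
  | Nat.succ f, rows =>
      if rows.any List.isEmpty then []
      else (rows.map (·.headD ' ')) :: pyZipStarGo f (rows.map (·.drop 1))

def pyZipStar (rows : List (List Char)) : List (List Char) :=
  match rows with
  | [] => []
  | r :: rs => pyZipStarGo r.length (r :: rs)

-- text.split("\n\n") (sep is the nonempty literal "\n\n", so split? is always
-- some and the .getD [] default is never used), then .splitlines() per chunk
def pyPatterns (text : String) : List (List (List Char)) :=
  ((PySem.Str.split? text "\n\n").getD []).map
    (fun chunk => (PySem.Str.splitlines chunk).map String.toList)

-- ===== PORT A =====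
-- diff = sum(c1 != c2 for l1, l2 in zip(p1, p2) for c1, c2 in zip(l1, l2))
def solveDiffA (pat : List (List Char)) (i : Int) : Int :=
  let p1 := PySem.List.slice pat (some i) none
  let p2 := (PySem.List.slice pat none (some i)).reverse   -- pat[:index][::-1]
  (((p1.zip p2).flatMap (fun rr => rr.1.zip rr.2)).map
      (fun cc => if cc.1 ≠ cc.2 then (1 : Int) else 0)).sum

-- for index in range(1, len(pat)): summary[diff] += multiplier * index
def solveInnerA (s : PySem.Dict Int Int) (mult : Int) (pat : List (List Char)) :
    PySem.Dict Int Int :=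
  (PySem.List.pyRange 1 (pat.length : Int) 1).foldl
    (fun s i => s.modify (solveDiffA pat i) 0 (· + mult * i)) s

def solve (text : String) : List Int :=
  let summary := (pyPatterns text).foldl
    (fun s pattern =>
      [((100 : Int), pattern), (1, pyZipStar pattern)].foldl
        (fun s mp => solveInnerA s mp.1 mp.2) s)
    PySem.Dict.empty
  [summary.getD 0 0, summary.getD 1 0]

-- ===== PORT B =====
-- 'for a, b in zip(ra, rb): total += a != b'
def rowDiffB (r1 r2 : List Char) (total : Int) : Int :=
  (r1.zip r2).foldl (fun t cc => t + (if cc.1 ≠ cc.2 then 1 else 0)) total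

-- 'for (ja, ra), (jb, rb) in zip(above, below): …' with the id shortcut and
-- the 'if total > 1: break'
def pairScanB : List ((Int × List Char) × (Int × List Char)) → Int → Int
  | [], total => total
  | pr :: rest, total =>
      if pr.1.1 ≠ pr.2.1 then
        let t := rowDiffB pr.1.2 pr.2.2 total
        if t > 1 then t else pairScanB rest t
      else pairScanB rest total

-- tagged = [(first.setdefault(r, i), r) for i, r in enumerate(pat)]
-- (setdefault returns the stored value and inserts the key if absent)
def internB : List (Int × List Char) → PySem.Dict (List Char) Int →
    List (Int × List Char)
  | [], _ => []
  | p :: rest, d =>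
      ((d.get? p.2).getD p.1, p.2) :: internB rest (d.setdefault p.2 p.1)

-- the 'while below:' loop (above/below stacks, i the mirror line index)
def sweepB (mult : Int) : List (Int × List Char) → List (Int × List Char) →
    Int → Int × Int → Int × Int
  | _, [], _, t => t
  | above, b :: rest, i, t =>
      let above' := b :: above
      let i' := i + 1
      match rest with
      | [] => t                                     -- 'if not below: break'
      | _ :: _ =>
          let total := pairScanB (above'.zip rest) 0
          let t' := if total = 0 then (t.1 + mult * i', t.2)
                    else if total = 1 then (t.1, t.2 + mult * i') else t
          sweepB mult above' rest i' t'

def orientB (t : Int × Int) (mult : Int) (pat : List (List Char)) : Int × Int :=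
  sweepB mult [] (internB (PySem.List.enumerate pat) PySem.Dict.empty) 0 t

def solve_alt (text : String) : List Int :=
  let t := (pyPatterns text).foldl
    (fun t pattern =>
      [((100 : Int), pattern), (1, pyZipStar pattern)].foldl
        (fun t mp => orientB t mp.1 mp.2) t)
    ((0 : Int), (0 : Int))
  [t.1, t.2]

-- ===== PRECONDITION & SPEC =====
def Spec_solve (text : String) (out : List Int) : Prop := out = solve_alt text
instance (text : String) (out : List Int) : Decidable (Spec_solve text out) := by unfold Spec_solve; infer_instance

-- ===== CLAIM (what is proved, stated in full; the proofs are below) =====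
def Claim_equal_solve : Prop := ∀ (text : String), Dom_solve text → Spec_solve text (solve text)

-- ===== LEMMAS AND PROOFS =====

-- the mismatch count of one zipped row pair / of a list of row pairs
def cnt (cs : List (Char × Char)) : Int :=
  (cs.countP (fun cc => cc.1 ≠ cc.2) : Int)

def cntAll (ps : List (List Char × List Char)) : Int :=
  (ps.map (fun rr => cnt (rr.1.zip rr.2))).sum

-- the common specification both sides are reduced to: per mirror line i the
-- exact smudge count, classified into the two accumulators
def updSpec (mult : Int) (pat : List (List Char)) (t : Int × Int) (i : Int) :
    Int × Int :=
  let d := cntAll ((pat.drop i.toNat).zip ((pat.take i.toNat).reverse))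
  if d = 0 then (t.1 + mult * i, t.2)
  else if d = 1 then (t.1, t.2 + mult * i) else t

lemma cnt_nonneg (cs : List (Char × Char)) : 0 ≤ cnt cs := by
  simp [cnt]

lemma cntAll_nonneg (ps : List (List Char × List Char)) : 0 ≤ cntAll ps := by
  induction ps with
  | nil => simp [cntAll]
  | cons p t ih =>
      simp only [cntAll, List.map_cons, List.sum_cons] at *
      have := cnt_nonneg (p.1.zip p.2)
      omega

lemma zip_self_mem {α : Type} : ∀ (l : List α) (p : α × α),
    p ∈ l.zip l → p.1 = p.2
  | [], _, h => by simp at h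
  | x :: t, p, h => by
      rcases List.mem_cons.mp (by simpa using h) with h' | h'
      · simp [h']
      · exact zip_self_mem t p h'

lemma cnt_eq_zero_of_eq {r1 r2 : List Char} (h : r1 = r2) :
    cnt (r1.zip r2) = 0 := by
  subst h
  simp only [cnt, Int.natCast_eq_zero, List.countP_eq_zero]
  intro cc hcc
  simp [zip_self_mem _ _ hcc]

lemma cnt_cons (cc : Char × Char) (rest : List (Char × Char)) :
    cnt (cc :: rest) = (if cc.1 ≠ cc.2 then 1 else 0) + cnt rest := by
  by_cases heq : cc.1 = cc.2 <;> (simp [cnt, heq]; try omega)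

lemma cnt_swap (r1 r2 : List Char) : cnt (r2.zip r1) = cnt (r1.zip r2) := by
  rw [← List.zip_swap r1 r2]
  simp only [cnt, List.countP_map]
  apply congrArg
  apply List.countP_congr
  intro cc _
  simp [Prod.swap, ne_comm]

lemma cntAll_swap (l1 l2 : List (List Char)) :
    cntAll (l2.zip l1) = cntAll (l1.zip l2) := by
  rw [← List.zip_swap l1 l2]
  simp only [cntAll, List.map_map]
  apply congrArg
  apply List.map_congr_left
  intro p _
  simp [Function.comp, Prod.swap, cnt_swap]

-- A's flat 0/1 generator sum is the mismatch count of the zipped pair list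
lemma flat_sum_eq_cntAll (ps : List (List Char × List Char)) :
    ((ps.flatMap (fun rr => rr.1.zip rr.2)).map
        (fun cc => if cc.1 ≠ cc.2 then (1 : Int) else 0)).sum = cntAll ps := by
  induction ps with
  | nil => simp [cntAll]
  | cons rr rest ih =>
      simp only [List.flatMap_cons, List.map_append, List.sum_append, ih, cntAll,
        List.map_cons, List.sum_cons]
      congr 1
      induction rr.1.zip rr.2 with
      | nil => simp [cnt]
      | cons cc t iht =>
          rw [List.map_cons, List.sum_cons, iht, cnt_cons]

lemma solveDiffA_eq (pat : List (List Char)) (i : Int) (hi : 0 ≤ i) :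
    solveDiffA pat i =
      cntAll ((pat.drop i.toNat).zip ((pat.take i.toNat).reverse)) := by
  simp only [solveDiffA]
  rw [flat_sum_eq_cntAll, PySem.List.slice_from pat hi, PySem.List.slice_to pat hi]

-- ===== A side: the dict fold vs the two-accumulator spec fold =====
def DInv (s : PySem.Dict Int Int) (t : Int × Int) : Prop :=
  s.getD 0 0 = t.1 ∧ s.getD 1 0 = t.2

lemma innerA_spec (mult : Int) (pat : List (List Char)) :
    ∀ (L : List Int), (∀ i ∈ L, 1 ≤ i) → ∀ s t, DInv s t →
      DInv (L.foldl (fun s i => s.modify (solveDiffA pat i) 0 (· + mult * i)) s)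
           (L.foldl (updSpec mult pat) t) := by
  intro L
  induction L with
  | nil => intro _ s t h; simpa using h
  | cons i rest ih =>
      intro hmem s t h
      simp only [List.foldl_cons]
      apply ih (fun j hj => hmem j (by simp [hj]))
      have hi : (0 : Int) ≤ i := by have := hmem i (by simp); omega
      have hd := solveDiffA_eq pat i hi
      obtain ⟨h0, h1⟩ := h
      set dd := cntAll ((pat.drop i.toNat).zip ((pat.take i.toNat).reverse)) with hdd
      constructor <;>
      · simp only [updSpec, ← hdd, hd, PySem.Dict.getD_modify]
        rcases lt_trichotomy dd 1 with hlt | heq | hgt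
        · have hz : dd = 0 := by
            have := cntAll_nonneg ((pat.drop i.toNat).zip ((pat.take i.toNat).reverse))
            rw [← hdd] at this; omega
          simp [hz, h0, h1]
        · simp [heq, h0, h1]
        · have hk0 : ¬ ((0 : Int) = dd) := by omega
          have hk1 : ¬ ((1 : Int) = dd) := by omega
          have hn0 : ¬ (dd = 0) := by omega
          have hn1 : ¬ (dd = 1) := by omega
          simp [hk0, hk1, hn0, hn1, h0, h1]

lemma solveInnerA_spec (s : PySem.Dict Int Int) (t : Int × Int) (mult : Int)
    (pat : List (List Char)) (h : DInv s t) :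
    DInv (solveInnerA s mult pat)
         ((PySem.List.pyRange 1 (pat.length : Int) 1).foldl (updSpec mult pat) t) := by
  unfold solveInnerA
  apply innerA_spec
  · intro i hi
    exact (PySem.List.mem_pyRange_one.mp hi).1
  · exact h

-- ===== B side: interning is a faithful row renaming =====
lemma internB_map_snd :
    ∀ (l : List (Int × List Char)) (d : PySem.Dict (List Char) Int),
      (internB l d).map (·.2) = l.map (·.2) := by
  intro l
  induction l with
  | nil => intro d; simp [internB]
  | cons p rest ih => intro d; simp [internB, ih]

-- every produced tag points back (through pat) at its own row
lemma internB_prop (pat : List (List Char)) :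
    ∀ (l : List (Int × List Char)) (d : PySem.Dict (List Char) Int),
      (∀ p ∈ l, PySem.List.pyGetD pat p.1 [] = p.2) →
      (∀ r v, d.get? r = some v → PySem.List.pyGetD pat v [] = r) →
      ∀ q ∈ internB l d, PySem.List.pyGetD pat q.1 [] = q.2 := by
  intro l
  induction l with
  | nil => intro d _ _ q hq; simp [internB] at hq
  | cons p rest ih =>
      intro d hin hd q hq
      simp only [internB, List.mem_cons] at hq
      rcases hq with hq | hq
      · subst hq
        cases hget : d.get? p.2 with
        | none => simpa [hget] using hin p (by simp)
        | some v => simpa [hget] using hd p.2 v hget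
      · refine ih _ (fun x hx => hin x (by simp [hx])) ?_ q hq
        intro r v hget
        by_cases hr : r = p.2
        · subst hr
          rw [PySem.Dict.get?_setdefault_self] at hget
          cases hget2 : d.get? p.2 with
          | none =>
              rw [hget2] at hget
              simp only [Option.getD_none, Option.some.injEq] at hget
              subst hget
              exact hin p (by simp)
          | some w =>
              rw [hget2] at hget
              simp only [Option.getD_some, Option.some.injEq] at hget
              subst hget
              exact hd p.2 w hget2
        · rw [PySem.Dict.get?_setdefault_of_ne _ _ hr] at hget
          exact hd r v hget

lemma tagged_inj (pat : List (List Char)) :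
    ∀ p ∈ internB (PySem.List.enumerate pat) PySem.Dict.empty,
    ∀ q ∈ internB (PySem.List.enumerate pat) PySem.Dict.empty,
      p.1 = q.1 → p.2 = q.2 := by
  have key : ∀ q ∈ internB (PySem.List.enumerate pat) PySem.Dict.empty,
      PySem.List.pyGetD pat q.1 [] = q.2 := by
    apply internB_prop pat
    · intro p hp
      rcases (PySem.List.mem_enumerate_iff pat 0 p).mp hp with ⟨k, hk, rfl⟩
      simp [PySem.List.pyGetD_natCast, List.getD_eq_getElem?_getD, hk]
    · intro r v hget
      simp [PySem.Dict.empty, PySem.Dict.get?] at hget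
  intro p hp q hq hfst
  rw [← key p hp, ← key q hq, hfst]

lemma rowDiffB_eq : ∀ (cs : List (Char × Char)) (d : Int),
    cs.foldl (fun t cc => t + (if cc.1 ≠ cc.2 then 1 else 0)) d = d + cnt cs := by
  intro cs
  induction cs with
  | nil => intro d; simp [cnt]
  | cons cc rest ih =>
      intro d
      rw [List.foldl_cons, ih, cnt_cons]
      ring

-- the scan returns the exact smudge count while it is still ≤ 1, and some
-- value ≥ 2 as soon as the true count is ≥ 2
lemma pairScanB_cases :
    ∀ (ps : List ((Int × List Char) × (Int × List Char))) (d : Int),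
      (∀ p ∈ ps, p.1.1 = p.2.1 → p.1.2 = p.2.2) → 0 ≤ d → d ≤ 1 →
      (d + cntAll (ps.map (fun p => (p.1.2, p.2.2))) ≤ 1 ∧
         pairScanB ps d = d + cntAll (ps.map (fun p => (p.1.2, p.2.2)))) ∨
      (2 ≤ d + cntAll (ps.map (fun p => (p.1.2, p.2.2))) ∧ 2 ≤ pairScanB ps d) := by
  intro ps
  induction ps with
  | nil =>
      intro d _ h0 h1
      left
      constructor <;> simp [pairScanB, cntAll] <;> omega
  | cons pr rest ih =>
      intro d hinj h0 h1
      have hcnt := cnt_nonneg (pr.1.2.zip pr.2.2)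
      have hrest := cntAll_nonneg (rest.map (fun p => (p.1.2, p.2.2)))
      have hcons : cntAll ((pr :: rest).map (fun p => (p.1.2, p.2.2))) =
          cnt (pr.1.2.zip pr.2.2) + cntAll (rest.map (fun p => (p.1.2, p.2.2))) := by
        simp [cntAll]
      by_cases hids : pr.1.1 = pr.2.1
      · have hrows : pr.1.2 = pr.2.2 := hinj pr (by simp) hids
        have hz : cnt (pr.1.2.zip pr.2.2) = 0 := cnt_eq_zero_of_eq hrows
        have hni : ¬ (pr.1.1 ≠ pr.2.1) := by simp [hids]
        simp only [pairScanB, if_neg hni, hcons, hz, zero_add]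
        exact ih d (fun x hx => hinj x (by simp [hx])) h0 h1
      · simp only [pairScanB, if_pos hids, rowDiffB, rowDiffB_eq]
        rw [hcons]
        by_cases hbig : d + cnt (pr.1.2.zip pr.2.2) > 1
        · rw [if_pos hbig]
          right
          omega
        · rw [if_neg hbig]
          rcases ih (d + cnt (pr.1.2.zip pr.2.2)) (fun x hx => hinj x (by simp [hx]))
              (by omega) (by omega) with
            ⟨ha, hb⟩ | ⟨ha, hb⟩
          · left; constructor <;> [omega; (rw [hb]; ring)]
          · right; omega

-- the sweep from state k computes the spec fold over the remaining lines
lemma sweepB_spec (mult : Int) (tagged : List (Int × List Char))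
    (hinj : ∀ p ∈ tagged, ∀ q ∈ tagged, p.1 = q.1 → p.2 = q.2) :
    ∀ (below above : List (Int × List Char)) (k : Nat) (t : Int × Int),
      below = tagged.drop k → above = (tagged.take k).reverse →
      sweepB mult above below (k : Int) t =
        (PySem.List.pyRange ((k : Int) + 1) ((tagged.length : Int)) 1).foldl
          (updSpec mult (tagged.map (·.2))) t := by
  intro below
  induction below with
  | nil =>
      intro above k t hb _
      have hlen : tagged.length ≤ k := List.drop_eq_nil_iff.mp hb.symm
      rw [PySem.List.pyRange_one_eq_nil (by exact_mod_cast by omega)]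
      simp [sweepB]
  | cons b rest ih =>
      intro above k t hb ha
      have hk : k < tagged.length := by
        by_contra hge
        rw [List.drop_eq_nil_iff.mpr (by omega)] at hb
        exact List.cons_ne_nil _ _ hb
      have hbk : b = tagged[k] := by
        have := List.drop_eq_getElem_cons hk
        rw [← hb] at this
        exact (List.cons.injEq _ _ _ _ ▸ this).1
      have hrest : rest = tagged.drop (k + 1) := by
        have := List.drop_eq_getElem_cons hk
        rw [← hb] at this
        exact (List.cons.injEq _ _ _ _ ▸ this).2
      have htake : tagged.take (k + 1) = tagged.take k ++ [tagged[k]] := by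
        rw [List.take_add_one, List.getElem?_eq_getElem hk]
        rfl
      have habove' : b :: above = (tagged.take (k + 1)).reverse := by
        rw [htake, List.reverse_append, ha, hbk]
        simp
      cases rest with
      | nil =>
          have hlen : tagged.length ≤ k + 1 := by
            have := List.drop_eq_nil_iff.mp hrest.symm
            omega
          rw [PySem.List.pyRange_one_eq_nil (by exact_mod_cast by omega)]
          simp [sweepB]
      | cons c rest2 =>
          have hlen2 : k + 1 < tagged.length := by
            by_contra hge
            rw [List.drop_eq_nil_iff.mpr (by omega)] at hrest
            exact List.cons_ne_nil _ _ hrest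
          -- unfold one sweep step
          show (let above' := b :: above
                let i' := (k : Int) + 1
                let total := pairScanB (above'.zip (c :: rest2)) 0
                let t' := if total = 0 then (t.1 + mult * i', t.2)
                          else if total = 1 then (t.1, t.2 + mult * i') else t
                sweepB mult above' (c :: rest2) i' t') = _
          simp only []
          rw [PySem.List.pyRange_one_cons (by exact_mod_cast by omega), List.foldl_cons]
          have hcast : ((k : Int) + 1) = ((k + 1 : Nat) : Int) := by push_cast; ring
          have hrec := ih (b :: above) (k + 1) (by
            exact (if pairScanB ((b :: above).zip (c :: rest2)) 0 = 0 then
              (t.1 + mult * ((k : Int) + 1), t.2)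
            else if pairScanB ((b :: above).zip (c :: rest2)) 0 = 1 then
              (t.1, t.2 + mult * ((k : Int) + 1)) else t)) hrest habove'
          rw [hcast] at hrec ⊢
          rw [hrec]
          congr 1
          -- it remains to show the update equals updSpec at i = k+1
          have hpairs : ∀ p ∈ (b :: above).zip (c :: rest2), p.1.1 = p.2.1 → p.1.2 = p.2.2 := by
            intro p hp
            obtain ⟨p1, p2⟩ := p
            have h1 : p1 ∈ b :: above := (List.of_mem_zip hp).1
            have h2 : p2 ∈ c :: rest2 := (List.of_mem_zip hp).2
            rw [habove'] at h1
            have h1' : p1 ∈ tagged := List.mem_of_mem_take (List.mem_reverse.mp h1)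
            rw [hrest] at h2
            have h2' : p2 ∈ tagged := List.mem_of_mem_drop h2
            exact hinj p1 h1' p2 h2'
          have hC : cntAll (((b :: above).zip (c :: rest2)).map (fun p => (p.1.2, p.2.2))) =
              cntAll (((tagged.map (·.2)).drop (((k + 1 : Nat) : Int)).toNat).zip
                      (((tagged.map (·.2)).take (((k + 1 : Nat) : Int)).toNat).reverse)) := by
            have htoNat : (((k + 1 : Nat) : Int)).toNat = k + 1 := by simp
            have hmapzip : ((b :: above).zip (c :: rest2)).map (fun p => (p.1.2, p.2.2)) =
                ((b :: above).map (·.2)).zip ((c :: rest2).map (·.2)) := by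
              rw [List.zip_map]
              rfl
            rw [hmapzip, habove', hrest, htoNat]
            rw [List.map_reverse, ← List.map_take, ← List.map_drop]
            exact cntAll_swap _ _
          rcases pairScanB_cases ((b :: above).zip (c :: rest2)) 0 hpairs le_rfl
              (by norm_num) with ⟨hle, heq⟩ | ⟨hge, hbig⟩
          · rw [zero_add] at heq hle
            simp only [updSpec, ← hC, heq]
          · rw [zero_add] at hge
            have hn0 : ¬ (pairScanB ((b :: above).zip (c :: rest2)) 0 = 0) := by omega
            have hn1 : ¬ (pairScanB ((b :: above).zip (c :: rest2)) 0 = 1) := by omega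
            have hc0 : ¬ (cntAll (((b :: above).zip (c :: rest2)).map
                (fun p => (p.1.2, p.2.2))) = 0) := by omega
            have hc1 : ¬ (cntAll (((b :: above).zip (c :: rest2)).map
                (fun p => (p.1.2, p.2.2))) = 1) := by omega
            simp only [updSpec, ← hC, if_neg hn0, if_neg hn1, if_neg hc0, if_neg hc1]

lemma orientB_spec (s : PySem.Dict Int Int) (t : Int × Int) (mult : Int)
    (pat : List (List Char)) (h : DInv s t) :
    DInv (solveInnerA s mult pat) (orientB t mult pat) := by
  have hsnd : (internB (PySem.List.enumerate pat) PySem.Dict.empty).map (·.2) = pat := by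
    rw [internB_map_snd]
    exact PySem.List.map_snd_enumerate pat 0
  have hlen : (internB (PySem.List.enumerate pat) PySem.Dict.empty).length = pat.length := by
    have := congrArg List.length hsnd
    simpa using this
  have hsweep := sweepB_spec mult (internB (PySem.List.enumerate pat) PySem.Dict.empty)
    (tagged_inj pat) (internB (PySem.List.enumerate pat) PySem.Dict.empty) [] 0 t
    (by simp) (by simp)
  unfold orientB
  rw [show ((0 : Nat) : Int) = (0 : Int) from rfl] at hsweep
  rw [hsweep, hsnd, hlen]
  rw [show ((0 : Int) + 1) = 1 by ring]
  exact solveInnerA_spec s t mult pat h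

lemma pattern_step (s : PySem.Dict Int Int) (t : Int × Int)
    (pattern : List (List Char)) (h : DInv s t) :
    DInv ([((100 : Int), pattern), (1, pyZipStar pattern)].foldl
          (fun s mp => solveInnerA s mp.1 mp.2) s)
        ([((100 : Int), pattern), (1, pyZipStar pattern)].foldl
          (fun t mp => orientB t mp.1 mp.2) t) := by
  simp only [List.foldl_cons, List.foldl_nil]
  exact orientB_spec _ _ _ _ (orientB_spec _ _ _ _ h)

lemma fold_inv (pats : List (List (List Char))) (s : PySem.Dict Int Int)
    (t : Int × Int) (h : DInv s t) :
    DInv (pats.foldl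
        (fun s pattern =>
          [((100 : Int), pattern), (1, pyZipStar pattern)].foldl
            (fun s mp => solveInnerA s mp.1 mp.2) s) s)
      (pats.foldl
        (fun t pattern =>
          [((100 : Int), pattern), (1, pyZipStar pattern)].foldl
            (fun t mp => orientB t mp.1 mp.2) t) t) := by
  induction pats generalizing s t with
  | nil => simpa using h
  | cons p rest ih =>
      simp only [List.foldl_cons]
      exact ih _ _ (pattern_step _ _ _ h)

-- ===== VERDICT (by name: the statement is the Claim_ definition above) =====
theorem solve_spec : Claim_equal_solve := by
  intro text _
  unfold Spec_solve solve solve_alt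
  obtain ⟨h0, h1⟩ := fold_inv (pyPatterns text) PySem.Dict.empty (0, 0)
    ⟨by simp [PySem.Dict.getD_empty], by simp [PySem.Dict.getD_empty]⟩
  simp only [h0, h1]
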